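-- pv_equiv track=rewrite | github.com/cholwell/dancing-links | killer.py | generate_sums
-- ===== SOURCE A (Python) =====
-- import itertools as it
--
-- def generate_sums(cage_sum, size):
--     """returns all permutations of size 'size' that sum to 'value' as a list of tuples"""
--     #only the numbers 1-9 can be used as usual for sudoku
--     numbers = [1,2,3,4,5,6,7,8,9]
--     output_sums = []
--     all_combinations = list(it.permutations(numbers, size))
--     for combination in range(len(all_combinations)):
--         if sum(all_combinations[combination]) == cage_sum:
--             output_sums.append(all_combinations[combination])
--     #the output is a list of tuples, where each tuple is a candidate
--     return output_sums
-- ===== SOURCE B (Python) =====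
-- def generate_sums(cage_sum, size):
--     """returns all permutations of size 'size' that sum to 'value' as a list of tuples
--
--     Recursive backtracking: build tuples position by position over the still-available
--     digits, pruning any branch whose running sum already exceeds cage_sum.
--     """
--     def rec(avail, depth, s):
--         if depth == size:
--             return [()] if s == cage_sum else []
--         out = []
--         for i in range(len(avail)):
--             x = avail[i]
--             if s + x <= cage_sum:
--                 for tail in rec(avail[:i] + avail[i + 1:], depth + 1, s + x):
--                     out.append((x,) + tail)
--         return out
--     return rec([1, 2, 3, 4, 5, 6, 7, 8, 9], 0, 0)
-- ===== Notes on version B (the rewrite author's own statement) =====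
-- stated objective: alternative
-- what changed: A materialises every permutation of 1-9 of the given size and filters by sum; B builds tuples by recursive backtracking over the remaining digits, pruning any branch whose running sum already exceeds cage_sum.
-- crash fix: On negative size A raises ValueError (from itertools.permutations); B's recursion finds no tuple of that length and returns []. — e.g. on generate_sums(5, -1): A raises ValueError, B returns []
import Mathlib
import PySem

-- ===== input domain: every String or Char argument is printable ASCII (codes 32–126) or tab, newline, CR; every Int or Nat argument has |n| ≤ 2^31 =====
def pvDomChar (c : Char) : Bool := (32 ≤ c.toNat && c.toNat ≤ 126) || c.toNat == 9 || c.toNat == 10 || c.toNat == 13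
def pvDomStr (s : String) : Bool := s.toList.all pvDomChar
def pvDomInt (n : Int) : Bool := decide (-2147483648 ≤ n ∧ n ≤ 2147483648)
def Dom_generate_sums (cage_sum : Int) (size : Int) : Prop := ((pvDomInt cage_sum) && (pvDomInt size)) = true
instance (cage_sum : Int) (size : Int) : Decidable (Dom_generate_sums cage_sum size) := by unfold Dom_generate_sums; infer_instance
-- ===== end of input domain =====

-- B replaces A's generate-all-permutations-then-filter with a recursive backtracking
-- search pruning branches whose running sum already exceeds cage_sum (objective: alternative).


-- ===== PORT A =====
-- literal port of A: list(itertools.permutations([1..9], size)), then an index loop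
-- appending each combination whose sum equals cage_sum (a Python list with O(1)
-- indexing/append is an Array here; the result is returned as a List)
def generate_sums (cage_sum : Int) (size : Int) : List (List Int) :=
  let numbers : List Int := [1, 2, 3, 4, 5, 6, 7, 8, 9]
  let all_combinations := (PySem.List.permutations numbers size.toNat).toArray
  ((List.range all_combinations.size).foldl
    (fun output_sums combination =>
      if (all_combinations.getD combination []).sum = cage_sum then
        output_sums.push (all_combinations.getD combination [])
      else output_sums) #[]).toList

-- ===== PORT B =====
-- port of B's rec(avail, depth, s); the extra Nat argument is only a structural-recursion
-- guard: it starts at 9 = len(avail), shrinks with avail, and its 0 case is unreachable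
def generate_sums_rec (cage_sum : Int) (size : Int) : Nat → List Int → Int → Int → List (List Int)
  | fuel, avail, depth, s =>
    if depth = size then (if s = cage_sum then [[]] else [])
    else
      match fuel with
      | 0 => []
      | fuel + 1 =>
        (List.range avail.length).foldl
          (fun out i =>
            let x := avail.getD i 0
            if s + x ≤ cage_sum then
              out ++ (generate_sums_rec cage_sum size fuel (avail.eraseIdx i) (depth + 1) (s + x)).map (fun tail => x :: tail)
            else out) []

def generate_sums_alt (cage_sum : Int) (size : Int) : List (List Int) :=
  generate_sums_rec cage_sum size 9 [1, 2, 3, 4, 5, 6, 7, 8, 9] 0 0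

-- ===== PRECONDITION & SPEC =====
-- Pre_ excludes only negative size, where Python's itertools.permutations raises ValueError.
def Pre_generate_sums (cage_sum : Int) (size : Int) : Prop := 0 ≤ size
instance (cage_sum : Int) (size : Int) : Decidable (Pre_generate_sums cage_sum size) := by unfold Pre_generate_sums; infer_instance
def pvWitness_generate_sums : Int × Int := (10, 3)

-- On every negative size A raises ValueError (from itertools.permutations); B's backtracking naturally returns [].
def Raises_generate_sums (cage_sum : Int) (size : Int) : Prop := size < 0
instance (cage_sum : Int) (size : Int) : Decidable (Raises_generate_sums cage_sum size) := by unfold Raises_generate_sums; infer_instance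
def pvRaiseWitness_generate_sums : Int × Int := (5, -1)
def pvRaiseWitnessOut_generate_sums : List (List Int) := []

def Spec_generate_sums (cage_sum : Int) (size : Int) (out : List (List Int)) : Prop := out = generate_sums_alt cage_sum size
instance (cage_sum : Int) (size : Int) (out : List (List Int)) : Decidable (Spec_generate_sums cage_sum size out) := by unfold Spec_generate_sums; infer_instance

-- ===== CLAIM (what is proved, stated in full; the proofs are below) =====
def Claim_equal_generate_sums : Prop := ∀ (cage_sum : Int) (size : Int), Dom_generate_sums cage_sum size → Pre_generate_sums cage_sum size → Spec_generate_sums cage_sum size (generate_sums cage_sum size)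
def Claim_raises_generate_sums : Prop := (∀ (cage_sum : Int) (size : Int), Dom_generate_sums cage_sum size → Raises_generate_sums cage_sum size → ¬ Pre_generate_sums cage_sum size) ∧ (Dom_generate_sums (pvRaiseWitness_generate_sums.1) (pvRaiseWitness_generate_sums.2) ∧ Raises_generate_sums (pvRaiseWitness_generate_sums.1) (pvRaiseWitness_generate_sums.2) ∧ generate_sums_alt (pvRaiseWitness_generate_sums.1) (pvRaiseWitness_generate_sums.2) = pvRaiseWitnessOut_generate_sums)

-- ===== LEMMAS AND PROOFS =====

-- every tuple produced by permutations over a list of positive ints has a nonnegative sum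
lemma perm_sum_nonneg (k : Nat) (xs : List Int) (hpos : ∀ x ∈ xs, 1 ≤ x) :
    ∀ l ∈ PySem.List.permutations xs k, 0 ≤ l.sum := by
  induction k generalizing xs with
  | zero =>
    intro l hl
    simp [PySem.List.permutations] at hl
    simp [hl]
  | succ k ih =>
    intro l hl
    simp only [PySem.List.permutations, List.mem_flatMap, List.mem_range] at hl
    obtain ⟨i, hi, hl⟩ := hl
    rcases h : xs[i]? with _ | x
    · simp [h] at hl
    · rw [h] at hl
      simp only [List.mem_map] at hl
      obtain ⟨t, ht, rfl⟩ := hl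
      have hx : x ∈ xs := by
        obtain ⟨hlt, rfl⟩ := List.getElem?_eq_some_iff.mp h
        exact List.getElem_mem hlt
      have hts : 0 ≤ t.sum :=
        ih (xs.eraseIdx i) (fun y hy => hpos y (List.mem_of_mem_eraseIdx hy)) t ht
      have := hpos x hx
      simp only [List.sum_cons]
      omega

-- main invariant: the pruned DFS at depth size - k over the still-available digits equals
-- permutations-then-filter, for any running sum s (pruning is sound because sums of
-- permutations of positive digits are nonnegative)
lemma rec_eq_filter (cage_sum size : Int) (k : Nat) :
    ∀ (fuel : Nat) (avail : List Int) (s : Int),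
      (∀ x ∈ avail, 1 ≤ x) → avail.length ≤ fuel →
      generate_sums_rec cage_sum size fuel avail (size - k) s =
        (PySem.List.permutations avail k).filter (fun l => s + l.sum = cage_sum) := by
  induction k with
  | zero =>
    intro fuel avail s _ _
    rw [generate_sums_rec.eq_def]
    by_cases h : s = cage_sum <;> simp [PySem.List.permutations, List.filter, h]
  | succ k ih =>
    intro fuel avail s hpos hlen
    rw [generate_sums_rec.eq_def]
    have hne : size - ((k : Int) + 1) ≠ size := by omega
    push_cast
    rw [if_neg hne]
    match fuel with
    | 0 =>
      have : avail = [] := List.eq_nil_of_length_eq_zero (Nat.le_zero.mp hlen)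
      subst this
      simp [PySem.List.permutations]
    | fuel + 1 =>
      simp only [PySem.List.permutations, List.filter_flatMap]
      have hstep : ∀ (out : List (List Int)), ∀ i ∈ List.range avail.length,
          (fun out i =>
            let x := avail.getD i 0
            if s + x ≤ cage_sum then
              out ++ (generate_sums_rec cage_sum size fuel (avail.eraseIdx i) (size - (k+1:Int) + 1) (s + x)).map (fun tail => x :: tail)
            else out) out i
          = out ++ (fun i =>
              let x := avail.getD i 0
              if s + x ≤ cage_sum then
                (generate_sums_rec cage_sum size fuel (avail.eraseIdx i) (size - (k+1:Int) + 1) (s + x)).map (fun tail => x :: tail)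
              else []) i := by
        intro out i _
        simp only
        split <;> simp
      rw [PySem.List.foldl_congr_mem _ _ _ _ hstep,
          PySem.List.foldl_append_eq_flatMap]
      rw [List.nil_append]
      apply List.flatMap_congr
      intro i hi
      rw [List.mem_range] at hi
      have hget : avail[i]? = some avail[i] := List.getElem?_eq_getElem hi
      simp only [hget]
      have hxd : avail.getD i 0 = avail[i] := by simp [List.getD, hget]
      set x := avail[i] with hx
      have hlen' : (avail.eraseIdx i).length ≤ fuel := by
        rw [List.length_eraseIdx]
        simp [hi]; omega
      have hpos' : ∀ y ∈ avail.eraseIdx i, 1 ≤ y :=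
        fun y hy => hpos y (List.mem_of_mem_eraseIdx hy)
      have hdep : size - ((k:Int)+1) + 1 = size - k := by omega
      rw [hxd, hdep, ih fuel (avail.eraseIdx i) (s + x) hpos' hlen']
      rw [List.filter_map]
      by_cases hc : s + x ≤ cage_sum
      · rw [if_pos hc]
        congr 1
        apply List.filter_congr
        intro l _
        simp [Function.comp, Int.add_assoc]
      · rw [if_neg hc]
        have : List.filter ((fun l => decide (s + l.sum = cage_sum)) ∘ (fun p => x :: p)) (PySem.List.permutations (avail.eraseIdx i) k) = [] := by
          apply List.filter_eq_nil_iff.mpr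
          intro l hl
          have h0 : 0 ≤ l.sum := perm_sum_nonneg k _ hpos' l hl
          simp [Function.comp, List.sum_cons]
          omega
        rw [this, List.map_nil]

-- glue: the Array.push accumulator loop seen as the corresponding List append loop
lemma foldl_push_toList (p : Nat → Prop) [DecidablePred p] (g : Nat → List Int)
    (l : List Nat) (a : Array (List Int)) :
    (l.foldl (fun acc i => if p i then acc.push (g i) else acc) a).toList
      = l.foldl (fun acc i => if p i then acc ++ [g i] else acc) a.toList := by
  induction l generalizing a with
  | nil => rfl
  | cons x xs ih =>
    simp only [List.foldl_cons]
    by_cases h : p x <;> simp [h, ih, Array.toList_push]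

lemma map_getD_range (xs : List (List Int)) :
    (List.range xs.toArray.size).map (fun i => xs.toArray.getD i []) = xs := by
  apply List.ext_getElem
  · simp
  · intro i h1 h2
    simp at h1
    simp [Array.getD, h1]

theorem generate_sums_main (cage_sum size : Int) (h : 0 ≤ size) :
    generate_sums cage_sum size = generate_sums_alt cage_sum size := by
  unfold generate_sums generate_sums_alt
  simp only
  rw [foldl_push_toList (fun i => ((PySem.List.permutations ([1,2,3,4,5,6,7,8,9] : List Int) size.toNat).toArray.getD i []).sum = cage_sum)
      (fun i => (PySem.List.permutations ([1,2,3,4,5,6,7,8,9] : List Int) size.toNat).toArray.getD i [])]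
  rw [Array.toList_empty]
  rw [show (fun (output_sums : List (List Int)) (combination : Nat) =>
        if ((PySem.List.permutations ([1,2,3,4,5,6,7,8,9] : List Int) size.toNat).toArray.getD combination []).sum = cage_sum then
          output_sums ++ [(PySem.List.permutations ([1,2,3,4,5,6,7,8,9] : List Int) size.toNat).toArray.getD combination []]
        else output_sums)
      = (fun acc i =>
        if (fun j => decide (((PySem.List.permutations ([1,2,3,4,5,6,7,8,9] : List Int) size.toNat).toArray.getD j []).sum = cage_sum)) i = true then
          acc ++ [(fun j => (PySem.List.permutations ([1,2,3,4,5,6,7,8,9] : List Int) size.toNat).toArray.getD j []) i]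
        else acc) from by funext a b; simp]
  rw [PySem.List.foldl_append_if]
  rw [List.nil_append]
  rw [show (fun j => decide (((PySem.List.permutations ([1,2,3,4,5,6,7,8,9] : List Int) size.toNat).toArray.getD j []).sum = cage_sum))
      = ((fun l : List Int => decide (l.sum = cage_sum)) ∘ (fun j => (PySem.List.permutations ([1,2,3,4,5,6,7,8,9] : List Int) size.toNat).toArray.getD j [])) from rfl]
  rw [← List.filter_map, map_getD_range]
  rw [show (0:Int) = size - (size.toNat : Int) from by omega]
  rw [rec_eq_filter cage_sum size size.toNat 9 [1,2,3,4,5,6,7,8,9] (size - (size.toNat:Int)) (by decide) (by decide)]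
  rw [show size - (size.toNat:Int) = 0 from by omega]
  simp

-- ===== VERDICT (by name: the statement is the Claim_ definition above) =====
theorem generate_sums_spec : Claim_equal_generate_sums := by
  intro cage_sum size _ hpre
  unfold Spec_generate_sums
  exact generate_sums_main cage_sum size hpre

@[simp] theorem generate_sums_raises : Claim_raises_generate_sums := by
  unfold Claim_raises_generate_sums
  exact ⟨fun c s _ hr => by unfold Pre_generate_sums Raises_generate_sums at *; omega, by decide⟩
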